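-- pv_equiv track=rewrite | github.com/T0ren4ik/first_semester_py | Матрицы (10 раздел)/Подготовка_к_кр/10.6.py | form_mat
-- ===== SOURCE A (Python) =====
-- def form_mat(n, nam):
--     h_w = 2 * n
--     a = [0] * h_w
--     if nam == 2:
--         for i in range(h_w):
--             a[i] = [0] * h_w
--             for j in range(h_w):
--                 A = i < n
--                 B = j < n
--                 a[i][j] = 1 if A and B else 4
--                 if not A and B:
--                     a[i][j] = 3
--                 if A and not B:
--                     a[i][j] = 2
--     else:
--         for i in range(h_w):
--             a[i] = [0] * h_w
--             for j in range(h_w):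
--                 A = i < n
--                 B = j < n
--                 a[i][j] = 1 if A and B else 3
--                 if not A and B:
--                     a[i][j] = 4
--                 if A and not B:
--                     a[i][j] = 2
--
--     return a
-- ===== SOURCE B (Python) =====
-- def form_mat(n, nam):
--     # Build the matrix from four constant quadrants: two row templates,
--     # repeated n times each (fresh copy per row).
--     tl, tr = 1, 2
--     bl, br = (3, 4) if nam == 2 else (4, 3)
--     top = [tl] * n + [tr] * n
--     bot = [bl] * n + [br] * n
--     return [top[:] for _ in range(n)] + [bot[:] for _ in range(n)]
-- ===== Notes on version B (the rewrite author's own statement) =====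
-- stated objective: simpler
-- what changed: B picks the four quadrant constants up front and builds the matrix by concatenating constant runs (two row templates copied n times each), replacing A's nested per-cell boolean branching.
import Mathlib
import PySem

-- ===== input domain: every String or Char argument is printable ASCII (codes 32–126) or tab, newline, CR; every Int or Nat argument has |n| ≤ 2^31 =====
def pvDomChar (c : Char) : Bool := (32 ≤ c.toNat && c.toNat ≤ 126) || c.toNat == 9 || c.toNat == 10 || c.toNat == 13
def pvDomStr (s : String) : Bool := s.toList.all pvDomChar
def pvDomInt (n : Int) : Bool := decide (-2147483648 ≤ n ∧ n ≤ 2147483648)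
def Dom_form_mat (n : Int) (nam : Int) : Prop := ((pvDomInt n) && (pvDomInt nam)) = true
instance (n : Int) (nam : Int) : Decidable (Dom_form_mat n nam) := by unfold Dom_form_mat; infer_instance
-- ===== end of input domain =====

-- B builds the 2n×2n matrix from four constant quadrants (two row templates repeated) instead of per-cell branching; objective: simpler.


-- ===== PORT A =====
def form_mat (n : Int) (nam : Int) : List (List Int) :=
  let h_w := 2 * n
  if nam = 2 then
    (PySem.List.pyRange 0 h_w 1).foldl (fun a i =>
      a ++ [(PySem.List.pyRange 0 h_w 1).foldl (fun row j =>
        let v : Int := if i < n ∧ j < n then 1 else 4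
        let v := if ¬ i < n ∧ j < n then 3 else v
        let v := if i < n ∧ ¬ j < n then 2 else v
        row ++ [v]) []]) []
  else
    (PySem.List.pyRange 0 h_w 1).foldl (fun a i =>
      a ++ [(PySem.List.pyRange 0 h_w 1).foldl (fun row j =>
        let v : Int := if i < n ∧ j < n then 1 else 3
        let v := if ¬ i < n ∧ j < n then 4 else v
        let v := if i < n ∧ ¬ j < n then 2 else v
        row ++ [v]) []]) []

-- ===== PORT B =====
def form_mat_alt (n : Int) (nam : Int) : List (List Int) :=
  let tl : Int := 1
  let tr : Int := 2
  let bb : Int × Int := if nam = 2 then (3, 4) else (4, 3)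
  let top := List.replicate n.toNat tl ++ List.replicate n.toNat tr
  let bot := List.replicate n.toNat bb.1 ++ List.replicate n.toNat bb.2
  List.replicate n.toNat top ++ List.replicate n.toNat bot

-- ===== PRECONDITION & SPEC =====
def Spec_form_mat (n : Int) (nam : Int) (out : List (List Int)) : Prop := out = form_mat_alt n nam
instance (n : Int) (nam : Int) (out : List (List Int)) : Decidable (Spec_form_mat n nam out) := by unfold Spec_form_mat; infer_instance

-- ===== CLAIM (what is proved, stated in full; the proofs are below) =====
def Claim_equal_form_mat : Prop := ∀ (n : Int) (nam : Int), Dom_form_mat n nam → Spec_form_mat n nam (form_mat n nam)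

-- ===== LEMMAS AND PROOFS =====

-- a map that is constant on [0,n) and constant on [n,2n) splits into two replicate blocks
theorem pv_map_split {α : Type} (n : Int) (hn : 0 < n) (c d : α) (f : Int → α)
    (h1 : ∀ j, 0 ≤ j → j < n → f j = c) (h2 : ∀ j, n ≤ j → j < 2 * n → f j = d) :
    (PySem.List.pyRange 0 (2 * n) 1).map f =
      List.replicate n.toNat c ++ List.replicate n.toNat d := by
  rw [PySem.List.pyRange_one_append 0 n (2 * n) (by omega) (by omega), List.map_append]
  congr 1
  · rw [List.map_congr_left (fun j hj => h1 j
      ((PySem.List.mem_pyRange_one.mp hj).1) ((PySem.List.mem_pyRange_one.mp hj).2))]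
    simp [List.map_const', PySem.List.length_pyRange_one]
  · rw [List.map_congr_left (fun j hj => h2 j
      ((PySem.List.mem_pyRange_one.mp hj).1) ((PySem.List.mem_pyRange_one.mp hj).2))]
    simp [List.map_const', PySem.List.length_pyRange_one]
    congr 1
    omega

-- A's nested loop with generic quadrant values p (tl), q (br), r (bl), s (tr)
theorem pv_gen (n p q r s : Int) :
    (PySem.List.pyRange 0 (2 * n) 1).foldl (fun a i =>
      a ++ [(PySem.List.pyRange 0 (2 * n) 1).foldl (fun row j =>
        let v : Int := if i < n ∧ j < n then p else q
        let v := if ¬ i < n ∧ j < n then r else v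
        let v := if i < n ∧ ¬ j < n then s else v
        row ++ [v]) []]) [] =
    List.replicate n.toNat (List.replicate n.toNat p ++ List.replicate n.toNat s) ++
      List.replicate n.toNat (List.replicate n.toNat r ++ List.replicate n.toNat q) := by
  by_cases hn : 0 < n
  · simp only [PySem.List.foldl_append_singleton_eq_map, List.nil_append]
    refine pv_map_split n hn _ _ _ (fun i hi0 hin => ?_) (fun i hin hi2 => ?_) <;>
    · refine pv_map_split n hn _ _ _ (fun j hj0 hjn => ?_) (fun j hjn hj2 => ?_) <;>
      · split_ifs <;> omega
  · rw [PySem.List.pyRange_one_eq_nil (by omega)]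
    simp [Int.toNat_of_nonpos (by omega : n ≤ 0)]

-- ===== VERDICT (by name: the statement is the Claim_ definition above) =====
theorem form_mat_spec : Claim_equal_form_mat := by
  intro n nam _
  unfold Spec_form_mat form_mat form_mat_alt
  by_cases hnam : nam = 2 <;> simp only [hnam, if_pos, reduceIte] <;>
    exact pv_gen n _ _ _ _
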